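-- pv_equiv track=rewrite | github.com/NayanPuniya/Plivo_ML_Assignment | Plivo_ML_assignment/src/rules.py | normalize_numbers_spoken
-- ===== SOURCE A (Python) =====
-- from typing import List, Optional, Tuple
--
-- NUM_WORD = {
--     'zero':'0','oh':'0','o':'0',
--     'one':'1','two':'2','three':'3','four':'4','five':'5',
--     'six':'6','seven':'7','eight':'8','nine':'9'
-- }
--
-- def words_to_digits(seq: List[str]) -> str:
--     """
--     Convert a short sequence of word tokens (like ['double','nine','one']) into
--     digits: '991' or '' if nothing convertible.
--     """
--     out = []
--     i = 0
--     while i < len(seq):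
--         tok = seq[i].lower()
--         if tok in ('double','triple') and i + 1 < len(seq):
--             times = 2 if tok == 'double' else 3
--             nxt = seq[i+1].lower()
--             if nxt in NUM_WORD:
--                 out.append(NUM_WORD[nxt] * times)
--                 i += 2
--                 continue
--         if tok in NUM_WORD:
--             out.append(NUM_WORD[tok])
--             i += 1
--             continue
--         # not a numeric token: stop trying further for this window
--         break
--     return ''.join(out)
--
-- def normalize_numbers_spoken(s: str) -> str:
--     """
--     Scan through tokens and greedily convert short runs of spoken digits into numeric strings.
--     This version only advances by the actual consumed tokens, avoiding skipping unrelated text.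
--     """
--     tokens = s.split()
--     out = []
--     i = 0
--     n = len(tokens)
--     while i < n:
--         # greedy attempt: examine up to 8 tokens (short) to try detect numeric run
--         window = tokens[i:i+8]
--         wd = words_to_digits(window)
--         if len(wd) >= 2:
--             # determine how many tokens were consumed by words_to_digits
--             # recompute consumption:
--             consumed = 0
--             # iterate window tokens and count how many token words contributed
--             j = 0
--             while j < len(window):
--                 tok = window[j].lower()
--                 if tok in ('double','triple'):
--                     # requires next token to be NUM_WORD
--                     if j+1 < len(window) and window[j+1].lower() in NUM_WORD:
--                         consumed += 2
--                         j += 2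
--                         continue
--                     else:
--                         break
--                 if tok in NUM_WORD:
--                     consumed += 1
--                     j += 1
--                     continue
--                 break
--             if consumed == 0:
--                 # safety fallback
--                 consumed = 1
--             out.append(wd)
--             i += consumed
--         else:
--             out.append(tokens[i])
--             i += 1
--     return ' '.join(out)
-- ===== SOURCE B (Python) =====
-- NUM_WORD = {
--     'zero':'0','oh':'0','o':'0',
--     'one':'1','two':'2','three':'3','four':'4','five':'5',
--     'six':'6','seven':'7','eight':'8','nine':'9'
-- }
--
-- def match_run(window):
--     """Single fused scan over the (capped) window: return (digit_string, tokens_consumed)."""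
--     if not window:
--         return '', 0
--     tok = window[0].lower()
--     if tok in ('double', 'triple'):
--         if len(window) >= 2 and window[1].lower() in NUM_WORD:
--             rest = match_run(window[2:])
--             reps = 2 if tok == 'double' else 3
--             return NUM_WORD[window[1].lower()] * reps + rest[0], rest[1] + 2
--         return '', 0
--     if tok in NUM_WORD:
--         rest = match_run(window[1:])
--         return NUM_WORD[tok] + rest[0], rest[1] + 1
--     return '', 0
--
-- def normalize_numbers_spoken(s: str) -> str:
--     tokens = s.split()
--     out = []
--     i = 0
--     while i < len(tokens):
--         digits, consumed = match_run(tokens[i:i+8])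
--         if len(digits) >= 2:
--             out.append(digits)
--             i += consumed
--         else:
--             out.append(tokens[i])
--             i += 1
--     return ' '.join(out)
-- ===== Notes on version B (the rewrite author's own statement) =====
-- stated objective: simpler
-- what changed: The digit-run helper does one fused recursive scan that returns both the digit string and the number of tokens consumed, so A's separate consumption-recount loop and its dead consumed==0 fallback disappear.
import Mathlib
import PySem

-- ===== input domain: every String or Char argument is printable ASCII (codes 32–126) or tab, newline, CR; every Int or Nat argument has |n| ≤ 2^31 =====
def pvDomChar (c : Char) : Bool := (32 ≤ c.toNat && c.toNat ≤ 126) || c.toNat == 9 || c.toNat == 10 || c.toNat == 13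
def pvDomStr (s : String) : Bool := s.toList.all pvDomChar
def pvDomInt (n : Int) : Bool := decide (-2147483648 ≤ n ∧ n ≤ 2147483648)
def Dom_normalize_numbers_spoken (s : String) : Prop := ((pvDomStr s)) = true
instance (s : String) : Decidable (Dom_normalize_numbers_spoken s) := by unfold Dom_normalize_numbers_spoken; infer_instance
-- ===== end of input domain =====

-- ===== PORT A =====
-- B is simpler: one fused scan returns (digits, consumed), removing A's recount loop and dead fallback.
-- shared module-level constant NUM_WORD and Python's str * int, used by both ports
def NUM_WORD : PySem.Dict String String := PySem.Dict.ofList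
  [("zero","0"),("oh","0"),("o","0"),
   ("one","1"),("two","2"),("three","3"),("four","4"),("five","5"),
   ("six","6"),("seven","7"),("eight","8"),("nine","9")]

def pyStrMul (s : String) (n : Nat) : String := String.ofList ((List.replicate n s.toList).flatten)

-- the while-loop of words_to_digits; the two top patterns resolve Python's 'i + 1 < len(seq)' test
def wtdLoop : List String → List String → List String
  | [], out => out
  | [t], out =>
    -- 'double'/'triple' need a next token, so only the plain NUM_WORD check can fire
    let tok := PySem.Str.lower t
    match NUM_WORD.get? tok with
    | some d => wtdLoop [] (out ++ [d])
    | none => out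
  | t :: nxt0 :: rest2, out =>
    let tok := PySem.Str.lower t
    if tok == "double" || tok == "triple" then
      let times : Nat := if tok == "double" then 2 else 3
      let nxt := PySem.Str.lower nxt0
      match NUM_WORD.get? nxt with
      | some d => wtdLoop rest2 (out ++ [pyStrMul d times])
      | none =>
        -- fall through to the plain NUM_WORD check ('double'/'triple' are never in NUM_WORD)
        match NUM_WORD.get? tok with
        | some d => wtdLoop (nxt0 :: rest2) (out ++ [d])
        | none => out
    else
      match NUM_WORD.get? tok with
      | some d => wtdLoop (nxt0 :: rest2) (out ++ [d])
      | none => out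

def words_to_digits (seq : List String) : String := PySem.Str.join "" (wtdLoop seq [])

-- A's consumption-recount loop (the inner while over the window)
def recountLoop : List String → Nat → Nat
  | [], c => c
  | [t], c =>
    let tok := PySem.Str.lower t
    if tok == "double" || tok == "triple" then c
    else if NUM_WORD.contains tok then recountLoop [] (c + 1) else c
  | t :: nxt0 :: rest2, c =>
    let tok := PySem.Str.lower t
    if tok == "double" || tok == "triple" then
      if NUM_WORD.contains (PySem.Str.lower nxt0) then recountLoop rest2 (c + 2) else c
    else if NUM_WORD.contains tok then recountLoop (nxt0 :: rest2) (c + 1) else c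

-- A's main while-loop; recursing on the token suffix, so tokens[i:i+8] is `take 8`
def aLoop : List String → List String → List String
  | [], out => out
  | t :: rest, out =>
    let window := (t :: rest).take 8
    let wd := words_to_digits window
    if 2 ≤ PySem.Str.len wd then
      let c0 := recountLoop window 0
      let consumed := if c0 == 0 then 1 else c0      -- safety fallback
      aLoop ((t :: rest).drop consumed) (out ++ [wd])
    else
      aLoop rest (out ++ [t])
  termination_by toks _ => toks.length
  decreasing_by
  · simp only [List.length_drop, List.length_cons]
    split
    · omega
    · rename_i hx; simp only [beq_iff_eq] at hx; omega
  · simp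

def normalize_numbers_spoken (s : String) : String :=
  PySem.Str.join " " (aLoop (PySem.Str.split₀ s) [])

-- ===== PORT B =====
-- Source B's match_run: one recursive scan returning (digit string, tokens consumed);
-- the two top patterns resolve Python's 'len(window) >= 2' test
def matchRun : List String → String × Nat
  | [] => ("", 0)
  | [t] =>
    let tok := PySem.Str.lower t
    if tok == "double" || tok == "triple" then ("", 0)
    else
      match NUM_WORD.get? tok with
      | some d => let r := matchRun []; (d ++ r.1, r.2 + 1)
      | none => ("", 0)
  | t :: nxt0 :: rest2 =>
    let tok := PySem.Str.lower t
    if tok == "double" || tok == "triple" then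
      match NUM_WORD.get? (PySem.Str.lower nxt0) with
      | some d =>
        let r := matchRun rest2
        (pyStrMul d (if tok == "double" then 2 else 3) ++ r.1, r.2 + 2)
      | none => ("", 0)
    else
      match NUM_WORD.get? tok with
      | some d => let r := matchRun (nxt0 :: rest2); (d ++ r.1, r.2 + 1)
      | none => ("", 0)

-- needed by bLoop's termination: a run worth keeping consumed at least one token
lemma matchRun_cases (w : List String) : (matchRun w).1 = "" ∨ 1 ≤ (matchRun w).2 := by
  match w with
  | [] => left; rfl
  | [t] =>
    by_cases hc : (PySem.Str.lower t == "double" || PySem.Str.lower t == "triple") = true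
    · left; simp [matchRun, hc]
    · cases hg : NUM_WORD.get? (PySem.Str.lower t) with
      | none => left; simp [matchRun, hc, hg]
      | some d => right; simp [matchRun, hc, hg]
  | t :: nxt0 :: rest2 =>
    by_cases hc : (PySem.Str.lower t == "double" || PySem.Str.lower t == "triple") = true
    · cases hg : NUM_WORD.get? (PySem.Str.lower nxt0) with
      | none => left; simp [matchRun, hc, hg]
      | some d => right; simp [matchRun, hc, hg]
    · cases hg : NUM_WORD.get? (PySem.Str.lower t) with
      | none => left; simp [matchRun, hc, hg]
      | some d => right; simp [matchRun, hc, hg]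

-- Source B's main while-loop
def bLoop : List String → List String → List String
  | [], out => out
  | t :: rest, out =>
    let p := matchRun ((t :: rest).take 8)
    if h : 2 ≤ PySem.Str.len p.1 then
      bLoop ((t :: rest).drop p.2) (out ++ [p.1])
    else
      bLoop rest (out ++ [t])
  termination_by toks _ => toks.length
  decreasing_by
  · have h1 : 1 ≤ (matchRun ((t :: rest).take 8)).2 := by
      rcases matchRun_cases ((t :: rest).take 8) with h0 | h0
      · rw [h0] at h; simp [PySem.Str.len] at h
      · exact h0
    simp only [List.length_drop, List.length_cons]
    omega
  · simp

def normalize_numbers_spoken_alt (s : String) : String :=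
  PySem.Str.join " " (bLoop (PySem.Str.split₀ s) [])

-- ===== PRECONDITION & SPEC =====
def Spec_normalize_numbers_spoken (s : String) (out : String) : Prop := out = normalize_numbers_spoken_alt s
instance (s : String) (out : String) : Decidable (Spec_normalize_numbers_spoken s out) := by unfold Spec_normalize_numbers_spoken; infer_instance

-- ===== CLAIM (what is proved, stated in full; the proofs are below) =====
def Claim_equal_normalize_numbers_spoken : Prop := ∀ (s : String), Dom_normalize_numbers_spoken s → Spec_normalize_numbers_spoken s (normalize_numbers_spoken s)

-- ===== LEMMAS AND PROOFS =====

lemma lower_dt_not_num (t : String)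
    (h : (PySem.Str.lower t == "double" || PySem.Str.lower t == "triple") = true) :
    NUM_WORD.get? (PySem.Str.lower t) = none := by
  rcases Bool.or_eq_true_iff.mp h with h | h <;> rw [beq_iff_eq.mp h] <;> decide

lemma joinNilChars (l : List (List Char)) : PySem.Chars.join [] l = l.flatten := by
  induction l with
  | nil => simp [PySem.Chars.join_nil]
  | cons x tl ih =>
    cases tl with
    | nil => simp [PySem.Chars.join_singleton]
    | cons y t2 => simp [PySem.Chars.join_cons_cons, ih]

lemma toList_join_empty (l : List String) :
    (PySem.Str.join "" l).toList = (l.map String.toList).flatten := by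
  simp [PySem.Str.toList_join, joinNilChars]

-- A's words_to_digits pieces flatten to exactly B's fused digit string
lemma wtdLoop_eq : ∀ (n : Nat) (w : List String), w.length = n → ∀ out : List String,
    ((wtdLoop w out).map String.toList).flatten
      = (out.map String.toList).flatten ++ ((matchRun w).1).toList := by
  intro n
  induction n using Nat.strong_induction_on with
  | _ n ih =>
    intro w hw out
    match w with
    | [] => simp [wtdLoop, matchRun]
    | [t] =>
      by_cases hc : (PySem.Str.lower t == "double" || PySem.Str.lower t == "triple") = true
      · simp [wtdLoop, matchRun, hc, lower_dt_not_num t hc]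
      · cases hg : NUM_WORD.get? (PySem.Str.lower t) with
        | none => simp [wtdLoop, matchRun, hc, hg]
        | some d => simp [wtdLoop, matchRun, hc, hg]
    | t :: nxt0 :: rest2 =>
      by_cases hc : (PySem.Str.lower t == "double" || PySem.Str.lower t == "triple") = true
      · cases hg : NUM_WORD.get? (PySem.Str.lower nxt0) with
        | none => simp [wtdLoop, matchRun, hc, hg, lower_dt_not_num t hc]
        | some d =>
          have hrec := ih rest2.length (by rw [← hw]; simp only [List.length_cons]; omega) rest2 rfl
            (out ++ [pyStrMul d (if PySem.Str.lower t == "double" then 2 else 3)])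
          simp only [wtdLoop, matchRun, hc, hg, if_pos]
          rw [hrec]; simp [pyStrMul]
      · cases hg : NUM_WORD.get? (PySem.Str.lower t) with
        | none => simp [wtdLoop, matchRun, hc, hg]
        | some d =>
          have hrec := ih (nxt0 :: rest2).length (by rw [← hw]; simp only [List.length_cons]; omega) (nxt0 :: rest2) rfl (out ++ [d])
          simp only [wtdLoop, matchRun, hc, hg, Bool.false_eq_true, if_false]
          rw [hrec]; simp

lemma words_to_digits_eq (w : List String) : words_to_digits w = (matchRun w).1 := by
  apply String.toList_inj.mp
  rw [words_to_digits, toList_join_empty, wtdLoop_eq w.length w rfl []]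
  simp

-- A's recount loop computes exactly B's consumed count
lemma recountLoop_eq : ∀ (n : Nat) (w : List String), w.length = n → ∀ c : Nat,
    recountLoop w c = c + (matchRun w).2 := by
  intro n
  induction n using Nat.strong_induction_on with
  | _ n ih =>
    intro w hw c
    match w with
    | [] => simp [recountLoop, matchRun]
    | [t] =>
      by_cases hc : (PySem.Str.lower t == "double" || PySem.Str.lower t == "triple") = true
      · simp [recountLoop, matchRun, hc]
      · cases hg : NUM_WORD.get? (PySem.Str.lower t) with
        | none =>
          have hm : NUM_WORD.contains (PySem.Str.lower t) = false := by
            simp [PySem.Dict.contains_eq_isSome_get?, hg]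
          simp [recountLoop, matchRun, hc, hg, hm]
        | some d =>
          have hm : NUM_WORD.contains (PySem.Str.lower t) = true := by
            simp [PySem.Dict.contains_eq_isSome_get?, hg]
          simp [recountLoop, matchRun, hc, hg, hm]
    | t :: nxt0 :: rest2 =>
      by_cases hc : (PySem.Str.lower t == "double" || PySem.Str.lower t == "triple") = true
      · cases hg : NUM_WORD.get? (PySem.Str.lower nxt0) with
        | none =>
          have hm : NUM_WORD.contains (PySem.Str.lower nxt0) = false := by
            simp [PySem.Dict.contains_eq_isSome_get?, hg]
          simp [recountLoop, matchRun, hc, hg, hm]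
        | some d =>
          have hm : NUM_WORD.contains (PySem.Str.lower nxt0) = true := by
            simp [PySem.Dict.contains_eq_isSome_get?, hg]
          have hrec := ih rest2.length (by rw [← hw]; simp only [List.length_cons]; omega) rest2 rfl (c + 2)
          simp only [recountLoop, matchRun, hc, hg, hm, if_pos]
          rw [hrec]; omega
      · cases hg : NUM_WORD.get? (PySem.Str.lower t) with
        | none =>
          have hm : NUM_WORD.contains (PySem.Str.lower t) = false := by
            simp [PySem.Dict.contains_eq_isSome_get?, hg]
          simp [recountLoop, matchRun, hc, hg, hm]
        | some d =>
          have hm : NUM_WORD.contains (PySem.Str.lower t) = true := by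
            simp [PySem.Dict.contains_eq_isSome_get?, hg]
          have hrec := ih (nxt0 :: rest2).length (by rw [← hw]; simp only [List.length_cons]; omega) (nxt0 :: rest2) rfl (c + 1)
          simp only [recountLoop, matchRun, hc, hg, hm, Bool.false_eq_true, if_false, if_pos]
          rw [hrec]; omega

-- the two main loops agree step by step
lemma loops_eq : ∀ (n : Nat) (toks : List String), toks.length = n → ∀ out : List String,
    aLoop toks out = bLoop toks out := by
  intro n
  induction n using Nat.strong_induction_on with
  | _ n ih =>
    intro toks hw out
    match toks with
    | [] => simp [aLoop, bLoop]
    | t :: rest =>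
      rw [aLoop, bLoop]
      simp only [words_to_digits_eq,
        recountLoop_eq ((t :: rest).take 8).length ((t :: rest).take 8) rfl 0, Nat.zero_add]
      by_cases hl : 2 ≤ PySem.Str.len (matchRun ((t :: rest).take 8)).1
      · have hpos : 1 ≤ (matchRun ((t :: rest).take 8)).2 := by
          rcases matchRun_cases ((t :: rest).take 8) with h0 | h0
          · rw [h0] at hl; simp [PySem.Str.len] at hl
          · exact h0
        have hz : ((matchRun ((t :: rest).take 8)).2 == 0) = false := by
          simp only [beq_eq_false_iff_ne, ne_eq]; omega
        rw [if_pos hl, dif_pos hl, hz]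
        simp only [Bool.false_eq_true, if_false]
        exact ih ((t :: rest).drop (matchRun ((t :: rest).take 8)).2).length
          (by rw [← hw]; simp only [List.length_drop, List.length_cons]; omega) _ rfl _
      · rw [if_neg hl, dif_neg hl]
        exact ih rest.length (by rw [← hw]; simp only [List.length_cons]; omega) rest rfl _

-- ===== VERDICT (by name: the statement is the Claim_ definition above) =====
theorem normalize_numbers_spoken_spec : Claim_equal_normalize_numbers_spoken := by
  intro s _
  unfold Spec_normalize_numbers_spoken normalize_numbers_spoken normalize_numbers_spoken_alt
  rw [loops_eq (PySem.Str.split₀ s).length (PySem.Str.split₀ s) rfl []]
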